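-- pv_equiv track=rewrite | github.com/lirrensi/agent-cli-helpers | src/agentcli_helpers/bg.py | slugify_root
-- ===== SOURCE A (Python) =====
-- def slugify_root(value: str, limit: int = 14) -> str:
--     slug = []
--     last_dash = False
--     for char in value.lower():
--         if char.isalnum():
--             slug.append(char)
--             last_dash = False
--         elif slug and not last_dash:
--             slug.append("-")
--             last_dash = True
--     result = "".join(slug).strip("-")
--     return result[:limit].strip("-") or "job"
-- ===== SOURCE B (Python) =====
-- from itertools import groupby
--
--
-- def slugify_root(value: str, limit: int = 14) -> str:
--     parts = ["".join(g) for k, g in groupby(value.lower(), key=str.isalnum) if k]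
--     result = "-".join(parts)
--     return result[:limit].strip("-") or "job"
-- ===== Notes on version B (the rewrite author's own statement) =====
-- stated objective: idiomatic
-- what changed: replaces the per-character dash-flag state machine with itertools.groupby partitioning into maximal alphanumeric runs joined by dashes
import Mathlib
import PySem

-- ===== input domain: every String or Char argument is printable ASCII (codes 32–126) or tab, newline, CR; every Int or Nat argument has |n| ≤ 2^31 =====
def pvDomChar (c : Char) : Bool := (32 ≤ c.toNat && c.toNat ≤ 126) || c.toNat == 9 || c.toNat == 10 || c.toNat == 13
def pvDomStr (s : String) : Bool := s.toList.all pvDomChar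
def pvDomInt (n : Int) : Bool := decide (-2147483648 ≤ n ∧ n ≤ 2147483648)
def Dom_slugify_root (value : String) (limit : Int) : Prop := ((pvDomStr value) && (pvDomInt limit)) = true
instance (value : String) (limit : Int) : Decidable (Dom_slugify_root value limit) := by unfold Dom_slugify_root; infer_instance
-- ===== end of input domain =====

-- B replaces A's per-character dash-flag state machine by a groupby into maximal
-- alphanumeric runs joined with dashes (idiomatic; same cost).

-- ===== PORT A =====
-- the loop body of A's `for char in value.lower()` over state (slug, last_dash)
def pvStep (st : List Char × Bool) (c : Char) : List Char × Bool :=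
  if PySem.Chars.isalnum c then (st.1 ++ [c], false)
  else if st.1 ≠ [] ∧ st.2 = false then (st.1 ++ ['-'], true)
  else st

def slugify_root (value : String) (limit : Int) : String :=
  let st := (PySem.Chars.lower value.toList).foldl pvStep ([], false)
  let result := PySem.Chars.stripChars st.1 ['-']
  let r := PySem.Chars.stripChars (PySem.List.slice result none (some limit)) ['-']
  String.ofList (if r = [] then "job".toList else r)

-- ===== PORT B =====
-- itertools.groupby: (key, maximal run of chars with that key) pairs, in order
def pvGroupBy (p : Char → Bool) : List Char → List (Bool × List Char)
  | [] => []
  | c :: cs =>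
      (p c, c :: cs.takeWhile (fun d => p d == p c)) ::
        pvGroupBy p (cs.dropWhile (fun d => p d == p c))
  termination_by ls => ls.length
  decreasing_by
    simp only [List.length_cons]
    exact Nat.lt_succ_of_le (List.length_dropWhile_le _ _)

def slugify_root_alt (value : String) (limit : Int) : String :=
  let parts := (pvGroupBy PySem.Chars.isalnum (PySem.Chars.lower value.toList)).filterMap
      (fun kg => if kg.1 then some kg.2 else none)
  let result := PySem.Chars.join ['-'] parts
  let r := PySem.Chars.stripChars (PySem.List.slice result none (some limit)) ['-']
  String.ofList (if r = [] then "job".toList else r)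

-- ===== PRECONDITION & SPEC =====
def Spec_slugify_root (value : String) (limit : Int) (out : String) : Prop := out = slugify_root_alt value limit
instance (value : String) (limit : Int) (out : String) : Decidable (Spec_slugify_root value limit out) := by unfold Spec_slugify_root; infer_instance

-- ===== CLAIM (what is proved, stated in full; the proofs are below) =====
def Claim_equal_slugify_root : Prop := ∀ (value : String) (limit : Int), Dom_slugify_root value limit → Spec_slugify_root value limit (slugify_root value limit)

-- ===== LEMMAS AND PROOFS =====

-- What A's machine emits once the slug is nonempty, split by the pending-dash flag:
-- pvOutF = dash still allowed (last_dash = False), pvOutT = dash just written (last_dash = True)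
mutual
def pvOutF : List Char → List Char
  | [] => []
  | c :: cs => if PySem.Chars.isalnum c then c :: pvOutF cs else '-' :: pvOutT cs
def pvOutT : List Char → List Char
  | [] => []
  | c :: cs => if PySem.Chars.isalnum c then c :: pvOutF cs else pvOutT cs
end

-- what the machine emits from the empty slug (no dash before the first alnum char)
def pvOutS : List Char → List Char
  | [] => []
  | c :: cs => if PySem.Chars.isalnum c then c :: pvOutF cs else pvOutS cs

-- B's kept groups and their dash-join
def pvParts (ls : List Char) : List (List Char) :=
  (pvGroupBy PySem.Chars.isalnum ls).filterMap (fun kg => if kg.1 then some kg.2 else none)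

def pvJ (ls : List Char) : List Char := List.intercalate ['-'] (pvParts ls)

theorem pvFoldl_ne (ls : List Char) : ∀ (s : List Char) (b : Bool), s ≠ [] →
    (ls.foldl pvStep (s, b)).1 = s ++ (if b then pvOutT ls else pvOutF ls) := by
  induction ls with
  | nil => intro s b hs; cases b <;> simp [pvOutT, pvOutF]
  | cons c cs ih =>
      intro s b hs
      by_cases hc : PySem.Chars.isalnum c
      · have hstep : pvStep (s, b) c = (s ++ [c], false) := by simp [pvStep, hc]
        simp only [List.foldl_cons, hstep]
        rw [ih (s ++ [c]) false (by simp)]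
        cases b <;> simp [pvOutT, pvOutF, hc]
      · cases b with
        | false =>
            have hstep : pvStep (s, false) c = (s ++ ['-'], true) := by
              simp [pvStep, hc, hs]
            simp only [List.foldl_cons, hstep]
            rw [ih (s ++ ['-']) true (by simp)]
            simp [pvOutF, hc]
        | true =>
            have hstep : pvStep (s, true) c = (s, true) := by simp [pvStep, hc]
            simp only [List.foldl_cons, hstep]
            rw [ih s true hs]
            simp [pvOutT, hc]

theorem pvFoldl_start (ls : List Char) : ∀ (b : Bool),
    (ls.foldl pvStep ([], b)).1 = pvOutS ls := by
  induction ls with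
  | nil => intro b; simp [pvOutS]
  | cons c cs ih =>
      intro b
      by_cases hc : PySem.Chars.isalnum c
      · have hstep : pvStep ([], b) c = ([c], false) := by simp [pvStep, hc]
        simp only [List.foldl_cons, hstep]
        rw [pvFoldl_ne cs [c] false (by simp)]
        simp [pvOutS, hc]
      · have hstep : pvStep ([], b) c = ([], b) := by simp [pvStep, hc]
        simp only [List.foldl_cons, hstep]
        rw [ih b]
        simp [pvOutS, hc]

theorem pvOutS_eq_outT (ls : List Char) : pvOutS ls = pvOutT ls := by
  induction ls with
  | nil => rfl
  | cons c cs ih =>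
      by_cases hc : PySem.Chars.isalnum c <;> simp [pvOutS, pvOutT, hc, ih]

theorem pvParts_nil : pvParts [] = [] := by simp [pvParts, pvGroupBy]

theorem pvParts_cons_p (c : Char) (cs : List Char) (hc : PySem.Chars.isalnum c = true) :
    pvParts (c :: cs) =
      (c :: cs.takeWhile PySem.Chars.isalnum) :: pvParts (cs.dropWhile PySem.Chars.isalnum) := by
  simp [pvParts, pvGroupBy, hc]

theorem pvParts_cons_np (c : Char) (cs : List Char) (hc : PySem.Chars.isalnum c = false) :
    pvParts (c :: cs) = pvParts (cs.dropWhile (fun d => !PySem.Chars.isalnum d)) := by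
  simp [pvParts, pvGroupBy, hc]

theorem pvParts_dropWhile (ls : List Char) :
    pvParts (ls.dropWhile (fun d => !PySem.Chars.isalnum d)) = pvParts ls := by
  cases ls with
  | nil => rfl
  | cons c cs =>
      by_cases hc : PySem.Chars.isalnum c
      · rw [List.dropWhile_cons, if_neg (by simp [hc])]
      · rw [List.dropWhile_cons, if_pos (by simpa using hc)]
        exact (pvParts_cons_np c cs (by simpa using hc)).symm

theorem pvParts_good (n : Nat) : ∀ ls : List Char, ls.length ≤ n →
    ∀ g ∈ pvParts ls, g ≠ [] ∧ ∀ x ∈ g, PySem.Chars.isalnum x := by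
  induction n with
  | zero =>
      intro ls hl g hg
      have : ls = [] := List.eq_nil_of_length_eq_zero (Nat.le_zero.mp hl)
      rw [this, pvParts_nil] at hg; cases hg
  | succ n ih =>
      intro ls hl g hg
      cases ls with
      | nil => rw [pvParts_nil] at hg; cases hg
      | cons c cs =>
          simp only [List.length_cons, Nat.succ_le_succ_iff] at hl
          by_cases hc : PySem.Chars.isalnum c
          · rw [pvParts_cons_p c cs hc] at hg
            rcases List.mem_cons.mp hg with hg | hg
            · subst hg
              refine ⟨by simp, ?_⟩
              intro x hx
              rcases List.mem_cons.mp hx with hx | hx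
              · simpa [hx] using hc
              · exact List.mem_takeWhile_imp hx
            · exact ih (cs.dropWhile PySem.Chars.isalnum)
                (le_trans (List.length_dropWhile_le _ _) hl) g hg
          · rw [pvParts_cons_np c cs (by simpa using hc), pvParts_dropWhile] at hg
            exact ih cs hl g hg

theorem pvIntercalate_cons (g : List Char) (gs : List (List Char)) :
    List.intercalate ['-'] (g :: gs) =
      g ++ (if gs = [] then [] else '-' :: List.intercalate ['-'] gs) := by
  cases gs with
  | nil => simp [List.intercalate]
  | cons h t => simp [List.intercalate, List.intersperse]

theorem pvOutF_allp (t rest : List Char) (ht : ∀ x ∈ t, PySem.Chars.isalnum x) :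
    pvOutF (t ++ rest) = t ++ pvOutF rest := by
  induction t with
  | nil => rfl
  | cons a t ih =>
      have ha : PySem.Chars.isalnum a := ht a (by simp)
      simp only [List.cons_append, pvOutF, ha, if_true]
      rw [ih (fun x hx => ht x (by simp [hx]))]

theorem pvDropWhile_head (p : Char → Bool) (l : List Char) (e : Char) (es : List Char)
    (h : l.dropWhile p = e :: es) : p e = false := by
  induction l with
  | nil => simp at h
  | cons a t ih =>
      rw [List.dropWhile_cons] at h
      by_cases ha : p a
      · rw [if_pos ha] at h; exact ih h
      · rw [if_neg ha] at h
        cases h; simpa using ha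

-- main characterization: the machine's tail output is B's dash-join, up to one trailing dash
theorem pvOutT_char (n : Nat) : ∀ ls : List Char, ls.length ≤ n →
    ∃ post, (post = [] ∨ (post = ['-'] ∧ pvParts ls ≠ [])) ∧ pvOutT ls = pvJ ls ++ post := by
  induction n with
  | zero =>
      intro ls hl
      have : ls = [] := List.eq_nil_of_length_eq_zero (Nat.le_zero.mp hl)
      subst this
      exact ⟨[], Or.inl rfl, by simp [pvOutT, pvJ, pvParts_nil, List.intercalate]⟩
  | succ n ih =>
      intro ls hl
      cases ls with
      | nil => exact ⟨[], Or.inl rfl, by simp [pvOutT, pvJ, pvParts_nil, List.intercalate]⟩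
      | cons c cs =>
          simp only [List.length_cons, Nat.succ_le_succ_iff] at hl
          by_cases hc : PySem.Chars.isalnum c
          · -- head is alphanumeric: a new group c :: takeWhile starts
            have hsplit : cs.takeWhile PySem.Chars.isalnum ++ cs.dropWhile PySem.Chars.isalnum = cs :=
              List.takeWhile_append_dropWhile
            have hout : pvOutT (c :: cs) = c :: (cs.takeWhile PySem.Chars.isalnum ++ pvOutF (cs.dropWhile PySem.Chars.isalnum)) := by
              simp only [pvOutT, hc, if_true]
              conv_lhs => rw [← hsplit]
              rw [pvOutF_allp _ _ (fun x hx => List.mem_takeWhile_imp hx)]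
            cases hdc : cs.dropWhile PySem.Chars.isalnum with
            | nil =>
                refine ⟨[], Or.inl rfl, ?_⟩
                rw [hout, hdc]
                simp [pvJ, pvOutF, pvParts_cons_p c cs hc, hdc, pvParts_nil, pvIntercalate_cons]
            | cons e es =>
                have he : PySem.Chars.isalnum e = false := pvDropWhile_head _ cs e es hdc
                have hes : es.length ≤ n := by
                  have h1 := List.length_dropWhile_le PySem.Chars.isalnum cs
                  rw [hdc] at h1; simp only [List.length_cons] at h1; omega
                obtain ⟨post, hpost, hT⟩ := ih es hes
                have hpd : pvParts (cs.dropWhile PySem.Chars.isalnum) = pvParts es := by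
                  rw [hdc, pvParts_cons_np e es he, pvParts_dropWhile]
                have hFd : pvOutF (cs.dropWhile PySem.Chars.isalnum) = '-' :: pvOutT es := by
                  rw [hdc]; simp [pvOutF, he]
                by_cases hpe : pvParts es = []
                · -- no further groups: the machine leaves exactly one trailing dash
                  have hpost0 : post = [] := by
                    rcases hpost with h | ⟨_, hne⟩
                    · exact h
                    · exact absurd hpe hne
                  have hTes : pvOutT es = [] := by
                    rw [hT, hpost0, pvJ, hpe]; simp [List.intercalate]
                  refine ⟨['-'], Or.inr ⟨rfl, by simp [pvParts_cons_p c cs hc]⟩, ?_⟩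
                  rw [hout, hFd, hTes]
                  simp [pvJ, pvParts_cons_p c cs hc, hpd, hpe, pvIntercalate_cons]
                · refine ⟨post, ?_, ?_⟩
                  · rcases hpost with h | ⟨h, _⟩
                    · exact Or.inl h
                    · exact Or.inr ⟨h, by simp [pvParts_cons_p c cs hc]⟩
                  · rw [hout, hFd, hT]
                    simp [pvJ, pvParts_cons_p c cs hc, hpd, hpe, pvIntercalate_cons]
          · -- head not alphanumeric: the machine (flag set) skips it; groupby drops the run
            have h1 : pvOutT (c :: cs) = pvOutT cs := by simp [pvOutT, hc]
            have h2 : pvParts (c :: cs) = pvParts cs := by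
              rw [pvParts_cons_np c cs (by simpa using hc), pvParts_dropWhile]
            obtain ⟨post, hpost, hT⟩ := ih cs hl
            exact ⟨post, by rwa [h2], by rw [h1, hT, pvJ, pvJ, h2]⟩

theorem pvJ_ne (ls : List Char) (h : pvParts ls ≠ []) : pvJ ls ≠ [] := by
  cases hp : pvParts ls with
  | nil => exact absurd hp h
  | cons g gs =>
      have hg : g ≠ [] := (pvParts_good ls.length ls le_rfl g (by rw [hp]; simp)).1
      rw [pvJ, hp, pvIntercalate_cons]
      intro hcon
      exact hg (List.append_eq_nil_iff.mp hcon).1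

theorem pvJ_head (ls : List Char) (a : Char) (h : (pvJ ls).head? = some a) :
    PySem.Chars.isalnum a := by
  cases hp : pvParts ls with
  | nil => rw [pvJ, hp] at h; simp [List.intercalate] at h
  | cons g gs =>
      have hgood := pvParts_good ls.length ls le_rfl g (by rw [hp]; simp)
      rw [pvJ, hp, pvIntercalate_cons, List.head?_append_of_ne_nil _ hgood.1] at h
      exact hgood.2 a (List.mem_of_mem_head? h)

theorem pvInter_last (gs : List (List Char))
    (hgood : ∀ g ∈ gs, g ≠ [] ∧ ∀ x ∈ g, PySem.Chars.isalnum x) :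
    ∀ b, (List.intercalate ['-'] gs).getLast? = some b → PySem.Chars.isalnum b := by
  induction gs with
  | nil => intro b h; simp [List.intercalate] at h
  | cons g gs ih =>
      intro b h
      have hg := hgood g (by simp)
      rw [pvIntercalate_cons] at h
      cases hgs : gs with
      | nil =>
          rw [hgs] at h; simp only [if_true, List.append_nil] at h
          exact hg.2 b (List.mem_of_mem_getLast? h)
      | cons g' gs' =>
          subst hgs
          have hne : List.intercalate ['-'] (g' :: gs') ≠ [] := by
            rw [pvIntercalate_cons]
            intro hcon
            exact (hgood g' (by simp)).1 (List.append_eq_nil_iff.mp hcon).1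
          rw [if_neg (by simp)] at h
          rw [List.getLast?_append_of_ne_nil _ (by simp)] at h
          rw [show ('-' :: List.intercalate ['-'] (g' :: gs'))
                = ['-'] ++ List.intercalate ['-'] (g' :: gs') from rfl,
              List.getLast?_append_of_ne_nil _ hne] at h
          exact ih (fun g hgm => hgood g (by simp [hgm])) b h

theorem pvJ_last (ls : List Char) (b : Char) (h : (pvJ ls).getLast? = some b) :
    PySem.Chars.isalnum b :=
  pvInter_last (pvParts ls) (pvParts_good ls.length ls le_rfl) b h

theorem pvDash_not_alnum : PySem.Chars.isalnum '-' = false := by decide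

theorem pvDropWhile_dash_eq_self (s : List Char)
    (h : ∀ a, s.head? = some a → PySem.Chars.isalnum a) :
    s.dropWhile (fun c => List.contains ['-'] c) = s := by
  cases s with
  | nil => rfl
  | cons a t =>
      have ha := h a rfl
      have : a ≠ '-' := by intro hcon; rw [hcon, pvDash_not_alnum] at ha; cases ha
      simp [this]

theorem pvStrip_J (ls post : List Char)
    (hpost : post = [] ∨ (post = ['-'] ∧ pvParts ls ≠ [])) :
    PySem.Chars.stripChars (pvJ ls ++ post) ['-'] = pvJ ls := by
  have hhead : ∀ a, (pvJ ls).head? = some a → PySem.Chars.isalnum a := pvJ_head ls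
  have hrev : ∀ a, (pvJ ls).reverse.head? = some a → PySem.Chars.isalnum a := by
    intro a h; rw [List.head?_reverse] at h; exact pvJ_last ls a h
  rcases hpost with h | ⟨h, hne⟩
  · subst h
    simp only [List.append_nil, PySem.Chars.stripChars]
    rw [pvDropWhile_dash_eq_self _ hhead, pvDropWhile_dash_eq_self _ hrev, List.reverse_reverse]
  · subst h
    have hJne : pvJ ls ≠ [] := pvJ_ne ls hne
    simp only [PySem.Chars.stripChars]
    rw [pvDropWhile_dash_eq_self (pvJ ls ++ ['-'])
        (by intro a ha; rw [List.head?_append_of_ne_nil _ hJne] at ha; exact hhead a ha)]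
    rw [List.reverse_append]
    simp only [List.reverse_singleton, List.singleton_append, List.dropWhile_cons]
    rw [if_pos (by simp)]
    rw [pvDropWhile_dash_eq_self _ hrev, List.reverse_reverse]

theorem pvMachine_strip (ls : List Char) :
    PySem.Chars.stripChars (ls.foldl pvStep ([], false)).1 ['-'] = pvJ ls := by
  rw [pvFoldl_start ls false, pvOutS_eq_outT]
  obtain ⟨post, hpost, hT⟩ := pvOutT_char ls.length ls le_rfl
  rw [hT]
  exact pvStrip_J ls post hpost

-- ===== VERDICT (by name: the statement is the Claim_ definition above) =====
theorem slugify_root_spec : Claim_equal_slugify_root := by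
  intro value limit _
  unfold Spec_slugify_root slugify_root slugify_root_alt
  dsimp only
  rw [pvMachine_strip (PySem.Chars.lower value.toList)]
  rfl
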